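-- pv_equiv track=rewrite | github.com/cs740wisc/simulator | libTK/utils/tkutils.py | javaHashcode
-- ===== SOURCE A (Python) =====
-- def javaHashcode(s):
--     """This function is a replica of the Java hashCode() function used to create an int32 hash
--         for strings. We need it for when we add new mappings to the COAP database."""
--
--     INT_MAX_JAVA = 2147483647
--     h = 0
--     n = len(s)
--
--     for i, c in enumerate(s):
--         h = (h + (ord(c) * 31 ** (n - 1 - i))) & 0xFFFFFFFF
--
--     if h <= INT_MAX_JAVA:
--         return h
--     else:
--         return 0 - (2 * INT_MAX_JAVA - h + 2)
-- ===== SOURCE B (Python) =====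
-- def javaHashcode(s):
--     """Java String.hashCode replica via Horner's rule: one multiply-add per
--     character instead of a fresh 31**k power per character."""
--     h = 0
--     for c in s:
--         h = (h * 31 + ord(c)) & 0xFFFFFFFF
--     return h - 0x100000000 if h >= 0x80000000 else h
-- ===== Notes on version B (the rewrite author's own statement) =====
-- stated objective: faster
-- what changed: Replaces the per-character recomputation of the big power 31**(n-1-i) with Horner's rule (h = h*31 + ord(c), masked), keeping the same 32-bit wrap and final sign conversion.
import Mathlib
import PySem

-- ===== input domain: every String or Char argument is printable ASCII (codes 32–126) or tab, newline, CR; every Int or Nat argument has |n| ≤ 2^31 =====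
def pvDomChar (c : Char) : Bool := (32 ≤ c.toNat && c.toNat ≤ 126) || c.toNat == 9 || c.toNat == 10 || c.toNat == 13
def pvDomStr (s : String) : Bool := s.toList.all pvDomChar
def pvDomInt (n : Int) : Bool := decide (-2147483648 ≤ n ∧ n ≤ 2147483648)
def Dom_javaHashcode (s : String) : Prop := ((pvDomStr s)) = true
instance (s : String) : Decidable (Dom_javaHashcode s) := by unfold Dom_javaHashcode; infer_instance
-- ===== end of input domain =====

-- B replaces A's per-character big-power sum with Horner's rule (objective: faster, O(n) vs O(n^2)).

-- ===== PORT A =====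
-- A's loop body; n is the captured len(s).  'h & 0xFFFFFFFF' on the always-nonnegative h is
-- exactly 'h % 4294967296' (Int.emod agrees with Python % for a positive divisor); the Python
-- exponent n-1-i is nonnegative in every executed iteration, so '.toNat' is exact there.
def javaHashcodeStepA (n : Int) (h : Int) (ic : Int × Char) : Int :=
  (h + (ic.2.toNat : Int) * 31 ^ ((n - 1 - ic.1).toNat)) % 4294967296

def javaHashcode (s : String) : Int :=
  let n : Int := (s.toList.length : Int)
  let h : Int := (PySem.List.enumerate s.toList 0).foldl (javaHashcodeStepA n) 0
  if h ≤ 2147483647 then h else 0 - (2 * 2147483647 - h + 2)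

-- ===== PORT B =====
def javaHashcodeStepB (h : Int) (c : Char) : Int :=
  (h * 31 + (c.toNat : Int)) % 4294967296

def javaHashcode_alt (s : String) : Int :=
  let h : Int := s.toList.foldl javaHashcodeStepB 0
  if h ≥ 2147483648 then h - 4294967296 else h

-- ===== PRECONDITION & SPEC =====
def Spec_javaHashcode (s : String) (out : Int) : Prop := out = javaHashcode_alt s
instance (s : String) (out : Int) : Decidable (Spec_javaHashcode s out) := by unfold Spec_javaHashcode; infer_instance

-- ===== CLAIM (what is proved, stated in full; the proofs are below) =====
def Claim_equal_javaHashcode : Prop := ∀ (s : String), Dom_javaHashcode s → Spec_javaHashcode s (javaHashcode s)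

-- ===== LEMMAS AND PROOFS =====

-- Both loop results stay in [0, 2^32).
lemma foldB_range (l : List Char) (h : Int) (hh : 0 ≤ h ∧ h < 4294967296) :
    0 ≤ l.foldl javaHashcodeStepB h ∧ l.foldl javaHashcodeStepB h < 4294967296 := by
  induction l generalizing h with
  | nil => exact hh
  | cons c t ih =>
      refine ih _ ⟨Int.emod_nonneg _ (by norm_num), Int.emod_lt_of_pos _ (by norm_num)⟩

lemma foldA_range (n : Int) (l : List (Int × Char)) (h : Int)
    (hh : 0 ≤ h ∧ h < 4294967296) :
    0 ≤ l.foldl (javaHashcodeStepA n) h ∧ l.foldl (javaHashcodeStepA n) h < 4294967296 := by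
  induction l generalizing h with
  | nil => exact hh
  | cons p t ih =>
      refine ih _ ⟨Int.emod_nonneg _ (by norm_num), Int.emod_lt_of_pos _ (by norm_num)⟩

-- Core invariant: processing the same suffix, A's accumulator is congruent to B's
-- accumulator times 31^(remaining length), mod 2^32.
lemma fold_congr (l : List Char) :
    ∀ (k hA hB n : Int), n = k + l.length →
      hA ≡ hB * 31 ^ l.length [ZMOD 4294967296] →
      (PySem.List.enumerate l k).foldl (javaHashcodeStepA n) hA ≡
        l.foldl javaHashcodeStepB hB [ZMOD 4294967296] := by
  induction l with
  | nil =>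
      intro k hA hB n _ hrel
      simpa [PySem.List.enumerate] using hrel
  | cons c t ih =>
      intro k hA hB n hn hrel
      have hexp : (n - 1 - k).toNat = t.length := by
        have : n - 1 - k = (t.length : Int) := by simp only [List.length_cons] at hn; push_cast at hn ⊢; omega
        omega
      rw [PySem.List.enumerate_cons]
      simp only [List.foldl_cons]
      apply ih (k + 1) _ _ n (by simp only [List.length_cons] at hn; push_cast at hn ⊢; omega)
      -- step congruence
      unfold javaHashcodeStepA javaHashcodeStepB
      have h1 : (hA + (c.toNat : Int) * 31 ^ ((n - 1 - k).toNat)) ≡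
          (hB * 31 + (c.toNat : Int)) * 31 ^ t.length [ZMOD 4294967296] := by
        rw [hexp]
        calc hA + (c.toNat : Int) * 31 ^ t.length
            ≡ hB * 31 ^ (c :: t).length + (c.toNat : Int) * 31 ^ t.length
              [ZMOD 4294967296] := Int.ModEq.add_right _ hrel
          _ = (hB * 31 + (c.toNat : Int)) * 31 ^ t.length := by
              simp [pow_succ]; ring
      calc (hA + (c.toNat : Int) * 31 ^ ((n - 1 - k).toNat)) % 4294967296
          ≡ hA + (c.toNat : Int) * 31 ^ ((n - 1 - k).toNat) [ZMOD 4294967296] :=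
            Int.emod_emod_of_dvd _ dvd_rfl
        _ ≡ (hB * 31 + (c.toNat : Int)) * 31 ^ t.length [ZMOD 4294967296] := h1
        _ ≡ (hB * 31 + (c.toNat : Int)) % 4294967296 * 31 ^ t.length
            [ZMOD 4294967296] :=
            Int.ModEq.mul_right _ (Int.ModEq.symm (Int.emod_emod_of_dvd _ dvd_rfl))

lemma folds_eq (s : String) :
    (PySem.List.enumerate s.toList 0).foldl (javaHashcodeStepA (s.toList.length : Int)) 0 =
      s.toList.foldl javaHashcodeStepB 0 := by
  have hcong := fold_congr s.toList 0 0 0 (s.toList.length : Int) (by simp)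
      (by simp [Int.ModEq])
  have hA := foldA_range (s.toList.length : Int) (PySem.List.enumerate s.toList 0) 0
      ⟨le_refl 0, by norm_num⟩
  have hB := foldB_range s.toList 0 ⟨le_refl 0, by norm_num⟩
  have := hcong
  unfold Int.ModEq at this
  rw [Int.emod_eq_of_lt hA.1 hA.2, Int.emod_eq_of_lt hB.1 hB.2] at this
  exact this

-- ===== VERDICT (by name: the statement is the Claim_ definition above) =====
theorem javaHashcode_spec : Claim_equal_javaHashcode := by
  intro s _
  unfold Spec_javaHashcode javaHashcode javaHashcode_alt
  simp only [folds_eq]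
  set h := s.toList.foldl javaHashcodeStepB 0 with hh
  split_ifs with h1 h2 h2 <;> omega
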